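-- pv_equiv track=rewrite | github.com/Shaund12/hyve-node-app-dist | server.py | hex_to_bech32
-- ===== SOURCE A (Python) =====
-- BECH32_CHARSET = "qpzry9x8gf2tvdw0s3jn54khce6mua7l"
--
-- def _convertbits(data, frombits, tobits, pad=True):
--     acc, bits, ret = 0, 0, []
--     maxv = (1 << tobits) - 1
--     for value in data:
--         acc = (acc << frombits) | value
--         bits += frombits
--         while bits >= tobits:
--             bits -= tobits
--             ret.append((acc >> bits) & maxv)
--     if pad and bits:
--         ret.append((acc << (tobits - bits)) & maxv)
--     return ret
--
-- def hex_to_bech32(hrp: str, hex_str: str) -> str: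
--     data = list(bytes.fromhex(hex_str))
--     conv = _convertbits(data, 8, 5)
--     hrp_exp = [ord(x) >> 5 for x in hrp] + [0] + [ord(x) & 31 for x in hrp]
--     polymod = 1
--     for v in hrp_exp + conv + [0, 0, 0, 0, 0, 0]:
--         b = polymod >> 25
--         polymod = ((polymod & 0x1ffffff) << 5) ^ v
--         for i, g in enumerate([0x3b6a57b2, 0x26508e6d, 0x1ea119fa, 0x3d4233dd, 0x2a1462b3]):
--             if (b >> i) & 1:
--                 polymod ^= g
--     polymod ^= 1
--     checksum = [(polymod >> 5 * (5 - i)) & 31 for i in range(6)]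
--     return hrp + "1" + "".join(BECH32_CHARSET[d] for d in conv + checksum)
-- ===== SOURCE B (Python) =====
-- BECH32_CHARSET = "qpzry9x8gf2tvdw0s3jn54khce6mua7l"
--
-- _GEN = [0x3b6a57b2, 0x26508e6d, 0x1ea119fa, 0x3d4233dd, 0x2a1462b3]
--
-- def hex_to_bech32(hrp: str, hex_str: str) -> str:
--     data = bytes.fromhex(hex_str)
--     # 8->5 bit regrouping via one big integer instead of a per-byte accumulator loop
--     n = int.from_bytes(data, 'big')
--     total = 8 * len(data)
--     groups = (total + 4) // 5
--     n <<= 5 * groups - total          # right-pad the last group with zeros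
--     conv = [(n >> (5 * (groups - 1 - i))) & 31 for i in range(groups)]
--     values = [ord(c) >> 5 for c in hrp] + [0] + [ord(c) & 31 for c in hrp] + conv + [0] * 6
--     chk = 1
--     for v in values:
--         top = chk >> 25
--         chk = ((chk & 0x1ffffff) << 5) ^ v
--         for mask, g in zip((1, 2, 4, 8, 16), _GEN):
--             if top & mask:
--                 chk ^= g
--     chk ^= 1
--     cs = []
--     for _ in range(6):
--         cs.append(chk & 31)
--         chk >>= 5
--     cs.reverse()
--     return hrp + "1" + "".join(BECH32_CHARSET[d] for d in conv + cs)
-- ===== Notes on version B (the rewrite author's own statement) =====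
-- stated objective: alternative
-- what changed: The per-byte shift-accumulator regrouping loop (_convertbits) is replaced by building one big integer with int.from_bytes and reading the 5-bit groups off it directly; the checksum inner loop tests precomputed bit masks via zip instead of enumerate-and-shift, and the six checksum digits are extracted low-bits-first and reversed instead of by a shift-amount formula.
import Mathlib
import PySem

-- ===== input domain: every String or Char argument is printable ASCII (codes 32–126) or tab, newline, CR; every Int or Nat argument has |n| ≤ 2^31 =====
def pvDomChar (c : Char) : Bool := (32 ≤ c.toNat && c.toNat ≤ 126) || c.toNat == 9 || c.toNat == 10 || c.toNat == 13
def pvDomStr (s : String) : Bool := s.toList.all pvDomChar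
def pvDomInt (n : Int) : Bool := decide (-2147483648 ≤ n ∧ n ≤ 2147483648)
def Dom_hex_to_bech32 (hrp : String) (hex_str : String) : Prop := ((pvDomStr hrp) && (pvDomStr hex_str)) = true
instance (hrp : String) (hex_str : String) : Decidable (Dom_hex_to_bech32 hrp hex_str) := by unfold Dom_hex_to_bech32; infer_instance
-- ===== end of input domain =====

-- B replaces A's per-byte accumulator regrouping (_convertbits) by one big-integer read-out of 5-bit
-- slices, a zip-with-masks checksum step and a low-bits/reverse checksum extraction (objective: alternative).

-- ===== SHARED HELPERS (ports of the CPython builtins both Pythons call) =====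

-- value of a hex digit (0 for a non-hex char; such a char never occurs inside Pre_)
def pvHexVal (c : Char) : Nat :=
  if 48 ≤ c.toNat ∧ c.toNat ≤ 57 then c.toNat - 48
  else if 97 ≤ c.toNat ∧ c.toNat ≤ 102 then c.toNat - 87
  else if 65 ≤ c.toNat ∧ c.toNat ≤ 70 then c.toNat - 55
  else 0

def pvIsHex (c : Char) : Bool :=
  (48 ≤ c.toNat && c.toNat ≤ 57) || (97 ≤ c.toNat && c.toNat ≤ 102) || (65 ≤ c.toNat && c.toNat ≤ 70)

-- the ASCII whitespace bytes.fromhex skips (CPython 3.11)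
def pvIsWs (c : Char) : Bool :=
  c.toNat == 32 || c.toNat == 9 || c.toNat == 10 || c.toNat == 13 || c.toNat == 11 || c.toNat == 12

-- port of bytes.fromhex: whitespace between byte pairs is skipped, each pair of hex digits is one byte;
-- exact on every input satisfying Pre_ (where CPython raises ValueError the result is unspecified)
def pvFromHex : List Char → List Nat
  | [] => []
  | [_] => []
  | c :: d :: rest =>
    if pvIsWs c then pvFromHex (d :: rest)
    else (16 * pvHexVal c + pvHexVal d) :: pvFromHex rest

def BECH32_CHARSET : List Char := "qpzry9x8gf2tvdw0s3jn54khce6mua7l".toList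

-- BECH32_CHARSET[d]; every call site has d < 32 = length, so the IndexError path is dead
def pvCharAt (d : Nat) : Char := BECH32_CHARSET.getD d ' '

def pvGEN : List Nat := [0x3b6a57b2, 0x26508e6d, 0x1ea119fa, 0x3d4233dd, 0x2a1462b3]

-- ===== PORT A =====

-- the inner `while bits >= tobits` loop of _convertbits (the 0 < tobits conjunct only makes the
-- recursion total; Python diverges for tobits = 0, a call that never happens)
def pvConvLoop (acc tobits maxv : Nat) (bits : Nat) (ret : List Nat) : Nat × List Nat :=
  if h : tobits ≤ bits ∧ 0 < tobits then
    pvConvLoop acc tobits maxv (bits - tobits) (ret ++ [(acc >>> (bits - tobits)) &&& maxv])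
  else (bits, ret)
termination_by bits
decreasing_by omega

def pvConvertbits (data : List Nat) (frombits tobits : Nat) (pad : Bool) : List Nat :=
  let maxv := (1 <<< tobits) - 1
  let st := data.foldl (fun (st : Nat × Nat × List Nat) value =>
      let acc := (st.1 <<< frombits) ||| value
      let br := pvConvLoop acc tobits maxv (st.2.1 + frombits) st.2.2
      (acc, br.1, br.2)) (0, 0, [])
  if pad && decide (st.2.1 ≠ 0) then st.2.2 ++ [(st.1 <<< (tobits - st.2.1)) &&& maxv] else st.2.2

def hex_to_bech32 (hrp : String) (hex_str : String) : String :=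
  let data := pvFromHex hex_str.toList
  let conv := pvConvertbits data 8 5 true
  let hrp_exp := hrp.toList.map (fun x => x.toNat >>> 5) ++ [0] ++ hrp.toList.map (fun x => x.toNat &&& 31)
  let polymod := (hrp_exp ++ conv ++ [0, 0, 0, 0, 0, 0]).foldl (fun polymod v =>
      let b := polymod >>> 25
      let polymod := ((polymod &&& 0x1ffffff) <<< 5) ^^^ v
      (pvGEN.zipIdx.foldl (fun polymod (gi : Nat × Nat) =>
        if (b >>> gi.2) &&& 1 ≠ 0 then polymod ^^^ gi.1 else polymod) polymod)) 1
  let polymod := polymod ^^^ 1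
  let checksum := (List.range 6).map (fun i => (polymod >>> (5 * (5 - i))) &&& 31)
  hrp ++ "1" ++ String.mk ((conv ++ checksum).map pvCharAt)

-- ===== PORT B =====

def pvMASKS : List Nat := [1, 2, 4, 8, 16]

def hex_to_bech32_alt (hrp : String) (hex_str : String) : String :=
  let data := pvFromHex hex_str.toList
  let n := data.foldl (fun a b => 256 * a + b) 0          -- int.from_bytes(data, 'big')
  let total := 8 * data.length
  let groups := (total + 4) / 5
  let n := n <<< (5 * groups - total)
  let conv := (List.range groups).map (fun i => (n >>> (5 * (groups - 1 - i))) &&& 31)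
  let values := hrp.toList.map (fun c => c.toNat >>> 5) ++ [0] ++ hrp.toList.map (fun c => c.toNat &&& 31)
      ++ conv ++ List.replicate 6 0
  let chk := values.foldl (fun chk v =>
      let top := chk >>> 25
      let chk := ((chk &&& 0x1ffffff) <<< 5) ^^^ v
      ((pvMASKS.zip pvGEN).foldl (fun chk mg =>
        if top &&& mg.1 ≠ 0 then chk ^^^ mg.2 else chk) chk)) 1
  let chk := chk ^^^ 1
  let cs := (List.range 6).foldl (fun (p : Nat × List Nat) _ => (p.1 >>> 5, p.2 ++ [p.1 &&& 31])) (chk, [])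
  hrp ++ "1" ++ String.mk ((conv ++ cs.2.reverse).map pvCharAt)

-- ===== PRECONDITION & SPEC =====

-- the grammar of a valid bytes.fromhex argument: hex digits in pairs, ASCII whitespace allowed
-- between pairs; exactly the inputs on which A returns (elsewhere bytes.fromhex raises ValueError)
def pvHexShape : List Char → Bool
  | [] => true
  | [c] => pvIsWs c
  | c :: d :: rest =>
    if pvIsWs c then pvHexShape (d :: rest)
    else pvIsHex c && pvIsHex d && pvHexShape rest

def Pre_hex_to_bech32 (hrp : String) (hex_str : String) : Prop := pvHexShape hex_str.toList = true
instance (hrp : String) (hex_str : String) : Decidable (Pre_hex_to_bech32 hrp hex_str) := by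
  unfold Pre_hex_to_bech32; infer_instance

def pvWitness_hex_to_bech32 : String × String := ("bc", "00 ffA3")

def Spec_hex_to_bech32 (hrp : String) (hex_str : String) (out : String) : Prop := out = hex_to_bech32_alt hrp hex_str
instance (hrp : String) (hex_str : String) (out : String) : Decidable (Spec_hex_to_bech32 hrp hex_str out) := by unfold Spec_hex_to_bech32; infer_instance

-- ===== CLAIM (what is proved, stated in full; the proofs are below) =====
def Claim_equal_hex_to_bech32 : Prop := ∀ (hrp : String) (hex_str : String), Dom_hex_to_bech32 hrp hex_str → Pre_hex_to_bech32 hrp hex_str → Spec_hex_to_bech32 hrp hex_str (hex_to_bech32 hrp hex_str)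

-- ===== LEMMAS AND PROOFS =====

theorem pvHexVal_lt (c : Char) : pvHexVal c < 16 := by
  unfold pvHexVal; split_ifs <;> omega

theorem pvFromHex_lt (l : List Char) : ∀ b ∈ pvFromHex l, b < 256 := by
  induction l using pvFromHex.induct with
  | case1 => simp [pvFromHex]
  | case2 c => simp [pvFromHex]
  | case3 c d rest hws ih => simp only [pvFromHex, if_pos hws]; exact ih
  | case4 c d rest hws ih =>
    simp only [pvFromHex, if_neg hws, List.mem_cons]
    rintro b (rfl | hb)
    · have h1 := pvHexVal_lt c; have h2 := pvHexVal_lt d; omega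
    · exact ih b hb

-- (a <<< 8) ||| b = 256*a + b for a byte b
theorem pvShlOr (a b : Nat) (h : b < 256) : (a <<< 8) ||| b = 256 * a + b := by
  rw [Nat.shiftLeft_eq, Nat.mul_comm a (2 ^ 8),
    ← Nat.two_pow_add_eq_or_of_lt (show b < 2 ^ 8 by omega) a]

theorem pvShrCancel8 (a b k : Nat) (h : b < 256) : (256 * a + b) >>> (8 + k) = a >>> k := by
  rw [Nat.shiftRight_add]
  congr 1
  rw [Nat.shiftRight_eq_div_pow]
  norm_num
  omega

theorem pvShlShrCancel (a s k : Nat) : (a <<< s) >>> (s + k) = a >>> k := by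
  rw [Nat.shiftRight_add, Nat.shiftLeft_shiftRight]

-- big-endian integer of the byte list (= A's accumulator after the fold, = B's int.from_bytes)
def pvBigN (l : List Nat) : Nat := l.foldl (fun a b => 256 * a + b) 0

-- the completed 5-bit groups after processing l
def pvSpecRet (l : List Nat) : List Nat :=
  (List.range ((8 * l.length) / 5)).map (fun i => (pvBigN l >>> (8 * l.length - 5 * (i + 1))) &&& 31)

theorem pvConvLoop_stop (acc bits : Nat) (ret : List Nat) (h : bits < 5) :
    pvConvLoop acc 5 31 bits ret = (bits, ret) := by
  rw [pvConvLoop]; simp only [dif_neg (by omega : ¬ (5 ≤ bits ∧ 0 < 5))]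

theorem pvConvLoop_go (acc bits : Nat) (ret : List Nat) (h : 5 ≤ bits) :
    pvConvLoop acc 5 31 bits ret = pvConvLoop acc 5 31 (bits - 5) (ret ++ [(acc >>> (bits - 5)) &&& 31]) := by
  rw [pvConvLoop]; simp only [dif_pos (by omega : 5 ≤ bits ∧ 0 < 5)]

-- invariant of A's per-byte fold
theorem pvBigN_append (l : List Nat) (b : Nat) : pvBigN (l ++ [b]) = 256 * pvBigN l + b := by
  simp [pvBigN]

theorem pvFold_char (l : List Nat) : (∀ b ∈ l, b < 256) →
    l.foldl (fun (st : Nat × Nat × List Nat) value =>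
      let acc := (st.1 <<< 8) ||| value
      let br := pvConvLoop acc 5 31 (st.2.1 + 8) st.2.2
      (acc, br.1, br.2)) (0, 0, [])
    = (pvBigN l, (8 * l.length) % 5, pvSpecRet l) := by
  induction l using List.reverseRecOn with
  | nil => intro _; simp [pvBigN, pvSpecRet]
  | append_singleton l b ih =>
    intro h
    have hb : b < 256 := h b (by simp)
    have hl : ∀ x ∈ l, x < 256 := fun x hx => h x (by simp [hx])
    rw [List.foldl_concat, ih hl]
    simp only []
    rw [pvShlOr _ _ hb]
    rw [pvConvLoop_go _ _ _ (by omega)]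
    by_cases h2 : (8 * l.length) % 5 < 2
    · rw [pvConvLoop_stop _ _ _ (by omega)]
      refine Prod.ext ?_ (Prod.ext ?_ ?_)
      · simp [pvBigN_append]
      · simp; omega
      · simp only []
        rw [pvSpecRet, pvSpecRet]
        have hq : (8 * (l ++ [b]).length) / 5 = (8 * l.length) / 5 + 1 := by simp; omega
        rw [hq, List.range_succ, List.map_append, pvBigN_append]
        congr 1
        · apply List.map_congr_left
          intro i hi
          have hi' : i < (8 * l.length) / 5 := List.mem_range.mp hi
          have he : 8 * (l ++ [b]).length - 5 * (i + 1) = 8 + (8 * l.length - 5 * (i + 1)) := by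
            simp; omega
          rw [he, pvShrCancel8 _ _ _ hb]
        · have ha : 8 * (l ++ [b]).length - 5 * ((8 * l.length) / 5 + 1)
              = 8 * l.length % 5 + 8 - 5 := by simp; omega
          simp only [List.map_cons, List.map_nil, ha]
      -- done branch r < 2
    · rw [pvConvLoop_go _ _ _ (by omega), pvConvLoop_stop _ _ _ (by omega)]
      refine Prod.ext ?_ (Prod.ext ?_ ?_)
      · simp [pvBigN_append]
      · simp; omega
      · simp only []
        rw [pvSpecRet, pvSpecRet]
        have hq : (8 * (l ++ [b]).length) / 5 = (8 * l.length) / 5 + 1 + 1 := by simp; omega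
        rw [hq, List.range_succ, List.range_succ, List.map_append, List.map_append, pvBigN_append]
        congr 1
        · congr 1
          · apply List.map_congr_left
            intro i hi
            have hi' : i < (8 * l.length) / 5 := List.mem_range.mp hi
            have he : 8 * (l ++ [b]).length - 5 * (i + 1) = 8 + (8 * l.length - 5 * (i + 1)) := by
              simp; omega
            rw [he, pvShrCancel8 _ _ _ hb]
          · have ha : 8 * (l ++ [b]).length - 5 * ((8 * l.length) / 5 + 1)
                = 8 * l.length % 5 + 8 - 5 := by simp; omega
            simp only [List.map_cons, List.map_nil, ha]
        · have ha2 : 8 * (l ++ [b]).length - 5 * ((8 * l.length) / 5 + 1 + 1)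
              = 8 * l.length % 5 + 8 - 5 - 5 := by simp; omega
          simp only [List.map_cons, List.map_nil, ha2]

-- A's conv equals B's conv
theorem pvConv_eq (l : List Nat) (h : ∀ b ∈ l, b < 256) :
    pvConvertbits l 8 5 true
    = (List.range ((8 * l.length + 4) / 5)).map (fun i =>
        ((pvBigN l <<< (5 * ((8 * l.length + 4) / 5) - 8 * l.length)) >>>
          (5 * ((8 * l.length + 4) / 5 - 1 - i))) &&& 31) := by
  unfold pvConvertbits
  simp only [show (1 : Nat) <<< 5 - 1 = 31 from rfl]
  rw [pvFold_char l h]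
  by_cases hr : (8 * l.length) % 5 = 0
  · simp only [hr, decide_not, Bool.true_and]
    norm_num
    have hG : (8 * l.length + 4) / 5 = (8 * l.length) / 5 := by omega
    have hs : 5 * ((8 * l.length) / 5) - 8 * l.length = 0 := by omega
    rw [pvSpecRet, hG, hs, Nat.shiftLeft_zero]
    apply List.map_congr_left
    intro i hi
    have hi' : i < (8 * l.length) / 5 := List.mem_range.mp hi
    have he : 8 * l.length - 5 * (i + 1) = 5 * ((8 * l.length) / 5 - 1 - i) := by omega
    rw [he]
  · simp only [hr, decide_not, Bool.true_and]
    norm_num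
    have hG : (8 * l.length + 4) / 5 = (8 * l.length) / 5 + 1 := by omega
    rw [pvSpecRet, hG, List.range_succ, List.map_append]
    congr 1
    · apply List.map_congr_left
      intro i hi
      have hi' : i < (8 * l.length) / 5 := List.mem_range.mp hi
      have he : 5 * ((8 * l.length) / 5 + 1 - 1 - i)
          = (5 * ((8 * l.length) / 5 + 1) - 8 * l.length) + (8 * l.length - 5 * (i + 1)) := by omega
      rw [he, pvShlShrCancel]
    · have h0 : 5 * ((8 * l.length) / 5 + 1 - 1 - (8 * l.length) / 5) = 0 := by omega
      have hs : 5 - (8 * l.length) % 5 = 5 * ((8 * l.length) / 5 + 1) - 8 * l.length := by omega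
      simp only [List.map_cons, List.map_nil, h0, Nat.shiftRight_zero, hs]

theorem bitcond (n i : Nat) : ((n >>> i) &&& 1 ≠ 0) ↔ (n &&& 2 ^ i ≠ 0) := by
  rw [Nat.and_two_pow, Nat.testBit, Nat.and_comm]
  rcases Nat.eq_zero_or_pos ((n >>> i) &&& 1) with h | h
  · simp [h]
  · simp [Nat.pos_iff_ne_zero.mp h]

theorem bc1 (n : Nat) : ((n >>> 1) &&& 1 ≠ 0) = (n &&& 2 ≠ 0) := by
  exact propext (by rw [bitcond n 1]; norm_num)
theorem bc2 (n : Nat) : ((n >>> 2) &&& 1 ≠ 0) = (n &&& 4 ≠ 0) := by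
  exact propext (by rw [bitcond n 2]; norm_num)
theorem bc3 (n : Nat) : ((n >>> 3) &&& 1 ≠ 0) = (n &&& 8 ≠ 0) := by
  exact propext (by rw [bitcond n 3]; norm_num)
theorem bc4 (n : Nat) : ((n >>> 4) &&& 1 ≠ 0) = (n &&& 16 ≠ 0) := by
  exact propext (by rw [bitcond n 4]; norm_num)

-- the two checksum step functions agree
theorem pvStep_eq (pm v : Nat) :
    (pvGEN.zipIdx.foldl (fun polymod (gi : Nat × Nat) =>
        if (pm >>> 25 >>> gi.2) &&& 1 ≠ 0 then polymod ^^^ gi.1 else polymod)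
      (((pm &&& 0x1ffffff) <<< 5) ^^^ v))
    = ((pvMASKS.zip pvGEN).foldl (fun chk mg =>
        if (pm >>> 25) &&& mg.1 ≠ 0 then chk ^^^ mg.2 else chk)
      (((pm &&& 0x1ffffff) <<< 5) ^^^ v)) := by
  have hz : pvGEN.zipIdx = [(0x3b6a57b2, 0), (0x26508e6d, 1), (0x1ea119fa, 2), (0x3d4233dd, 3), (0x2a1462b3, 4)] := by rfl
  have hm : pvMASKS.zip pvGEN = [(1, 0x3b6a57b2), (2, 0x26508e6d), (4, 0x1ea119fa), (8, 0x3d4233dd), (16, 0x2a1462b3)] := by rfl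
  simp only [hz, hm, List.foldl, Nat.shiftRight_zero, bc1, bc2, bc3, bc4]

-- A's checksum digit list equals B's build-low-then-reverse list
theorem pvChecksum_eq (pm : Nat) :
    (List.range 6).map (fun i => (pm >>> (5 * (5 - i))) &&& 31)
    = ((List.range 6).foldl (fun (p : Nat × List Nat) _ => (p.1 >>> 5, p.2 ++ [p.1 &&& 31])) (pm, [])).2.reverse := by
  simp only [show List.range 6 = [0, 1, 2, 3, 4, 5] from rfl, List.foldl, List.map,
    List.reverse_cons, List.reverse_nil, List.nil_append, List.cons_append,
    ← Nat.shiftRight_add]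
  norm_num

-- ===== VERDICT (by name: the statement is the Claim_ definition above) =====
theorem hex_to_bech32_spec : Claim_equal_hex_to_bech32 := by
  intro hrp hex_str _ _
  unfold Spec_hex_to_bech32 hex_to_bech32 hex_to_bech32_alt
  simp only []
  rw [pvConv_eq _ (pvFromHex_lt hex_str.toList)]
  rw [show List.foldl (fun a b : Nat => 256 * a + b) 0 (pvFromHex hex_str.toList)
      = pvBigN (pvFromHex hex_str.toList) from rfl]
  rw [show List.replicate 6 (0 : Nat) = [0, 0, 0, 0, 0, 0] from rfl]
  simp only [List.append_assoc]
  rw [pvChecksum_eq]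
  congr 3
  congr 1
  congr 1
  congr 1
  congr 1
  congr 1
  congr 1
  apply List.foldl_ext
  intro pm v _
  exact pvStep_eq pm v
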